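-- pv_equiv track=rewrite | github.com/alceubissoto/mo640 | cgp.py | recursive_get_binary_tree
-- ===== SOURCE A (Python) =====
-- input_amount = 20 # Amount of inputs
--
-- def recursive_get_binary_tree(cur, valid_graph, visited, valid_tree):
--     if cur in visited:
--         return -1
--
--     visited.add(cur)
--
--     # If input, return itself
--     if cur < input_amount:
--         return cur
--
--     left = valid_graph[cur][0]
--     right = valid_graph[cur][1]
--     node_with_input_left = recursive_get_binary_tree(left, valid_graph, visited, valid_tree)
--     node_with_input_right = recursive_get_binary_tree(right, valid_graph, visited, valid_tree)
--
--     if node_with_input_left >= 0 and node_with_input_right >= 0: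
--         valid_tree[cur] = [node_with_input_left, node_with_input_right]
--         return cur
--
--     return node_with_input_left if node_with_input_left >= 0 else node_with_input_right
-- ===== SOURCE B (Python) =====
-- input_amount = 20  # Amount of inputs
--
-- def recursive_get_binary_tree(cur, valid_graph, visited, valid_tree):
--     # Iterative DFS with an explicit frame stack and a value stack
--     # (mutates `visited` and `valid_tree` exactly like the recursive version).
--     frames = [(False, cur)]
--     vals = []
--     while frames:
--         phase, node = frames.pop()
--         if not phase:  # visit phase
--             if node in visited:
--                 vals.append(-1)
--                 continue
--             visited.add(node)
--             if node < input_amount: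
--                 vals.append(node)
--                 continue
--             children = valid_graph[node]
--             frames.append((True, node))          # exit phase after both children
--             frames.append((False, children[1]))
--             frames.append((False, children[0]))  # left processed first
--         else:  # exit phase: combine the two child results
--             right_val = vals.pop()
--             left_val = vals.pop()
--             if left_val >= 0 and right_val >= 0:
--                 valid_tree[node] = [left_val, right_val]
--                 vals.append(node)
--             else:
--                 vals.append(left_val if left_val >= 0 else right_val)
--     return vals[-1]
-- ===== Notes on version B (the rewrite author's own statement) =====
-- stated objective: alternative
-- what changed: The recursive DFS is replaced by an iterative DFS driven by an explicit stack of visit/exit frames plus a value stack, with the combine rule applied in the exit phase; no recursion remains.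
-- outside the precondition, e.g. on recursive_get_binary_tree(25, {25: [1, 2], 30: []}, set(), {}): A returns 25, B returns 25
import Mathlib
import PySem

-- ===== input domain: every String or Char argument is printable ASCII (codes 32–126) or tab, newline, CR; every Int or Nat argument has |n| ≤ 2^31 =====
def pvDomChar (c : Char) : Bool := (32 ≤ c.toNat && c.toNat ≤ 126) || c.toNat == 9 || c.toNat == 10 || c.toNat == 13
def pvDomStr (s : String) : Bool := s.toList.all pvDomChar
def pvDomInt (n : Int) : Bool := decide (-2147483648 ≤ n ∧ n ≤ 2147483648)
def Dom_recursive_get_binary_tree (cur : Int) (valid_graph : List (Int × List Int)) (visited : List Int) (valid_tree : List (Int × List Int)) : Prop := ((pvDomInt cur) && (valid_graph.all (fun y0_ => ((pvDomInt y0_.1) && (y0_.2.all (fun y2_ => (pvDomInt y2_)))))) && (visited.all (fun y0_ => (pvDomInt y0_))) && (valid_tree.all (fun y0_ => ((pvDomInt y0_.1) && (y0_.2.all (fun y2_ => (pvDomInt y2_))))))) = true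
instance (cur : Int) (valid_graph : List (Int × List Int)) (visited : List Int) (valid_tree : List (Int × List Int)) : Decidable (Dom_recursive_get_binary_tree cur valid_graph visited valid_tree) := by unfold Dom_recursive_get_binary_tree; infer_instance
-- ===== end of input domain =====

-- B replaces A's recursive DFS by an iterative DFS over an explicit frame stack plus a value
-- stack (objective: alternative decomposition). Both A and B mutate `visited`/`valid_tree` the
-- same way in Python; the equivalence proved here is about the RETURN value.

-- ===== PORT A =====
-- Fuel is only a totality device (each step of the fuel-match is one Python call; under
-- Pre_ the fuel valid_graph.length + 1 is proved sufficient). The state triple threads the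
-- mutation of `visited` (a Python set) and `valid_tree` (a dict); `none` = a Python exception.
def goA (fuel : Nat) (g : List (Int × List Int)) (cur : Int) (visited : List Int) (tree : List (Int × List Int)) : Option (Int × List Int × List (Int × List Int)) :=
  match fuel with
  | 0 => none
  | fuel + 1 =>
    if cur ∈ visited then some (-1, visited, tree)
    else
      let v1 := PySem.Set.add visited cur
      if cur < 20 then some (cur, v1, tree)
      else
        match (PySem.Dict.mk g).get? cur with
        | none => none            -- KeyError
        | some children =>
          match PySem.List.pyGet? children 0, PySem.List.pyGet? children 1 with
          | some left, some right =>
            match goA fuel g left v1 tree with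
            | none => none
            | some (l, v2, t2) =>
              match goA fuel g right v2 t2 with
              | none => none
              | some (r, v3, t3) =>
                if l ≥ 0 ∧ r ≥ 0 then some (cur, v3, ((PySem.Dict.mk t3).insert cur [l, r]).items)
                else some (if l ≥ 0 then l else r, v3, t3)
          | _, _ => none          -- IndexError

def recursive_get_binary_tree (cur : Int) (valid_graph : List (Int × List Int)) (visited : List Int) (valid_tree : List (Int × List Int)) : Int :=
  match goA (valid_graph.length + 1) valid_graph cur visited valid_tree with
  | some (r, _, _) => r
  | none => 0                     -- Python raises here; excluded by Pre_

-- ===== PORT B =====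
-- Frame (false, n) = visit phase of node n, (true, n) = exit/combine phase; vals has its top
-- at the head (Python appends/pops at the end). Fuel bounds the number of loop iterations.
def goB (fuel : Nat) (g : List (Int × List Int)) (frames : List (Bool × Int)) (vals : List Int) (visited : List Int) (tree : List (Int × List Int)) : Option (Int × List Int × List (Int × List Int)) :=
  match fuel with
  | 0 => none
  | fuel + 1 =>
    match frames with
    | [] =>
      match vals with
      | v :: _ => some (v, visited, tree)   -- return vals[-1]
      | [] => none                          -- IndexError (unreachable from the initial stack)
    | (phase, node) :: frames =>
      if phase = false then
        if node ∈ visited then goB fuel g frames ((-1) :: vals) visited tree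
        else
          let v1 := PySem.Set.add visited node
          if node < 20 then goB fuel g frames (node :: vals) v1 tree
          else
            match (PySem.Dict.mk g).get? node with
            | none => none                  -- KeyError
            | some children =>
              match PySem.List.pyGet? children 0, PySem.List.pyGet? children 1 with
              | some left, some right =>
                goB fuel g ((false, left) :: (false, right) :: (true, node) :: frames) vals v1 tree
              | _, _ => none                -- IndexError
      else
        match vals with
        | r :: l :: vals =>
          if l ≥ 0 ∧ r ≥ 0 then goB fuel g frames (node :: vals) visited (((PySem.Dict.mk tree).insert node [l, r]).items)
          else goB fuel g frames ((if l ≥ 0 then l else r) :: vals) visited tree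
        | _ => none

def recursive_get_binary_tree_alt (cur : Int) (valid_graph : List (Int × List Int)) (visited : List Int) (valid_tree : List (Int × List Int)) : Int :=
  match goB (2 ^ (valid_graph.length + 2)) valid_graph [(false, cur)] [] visited valid_tree with
  | some (r, _, _) => r
  | none => 0                     -- Python raises here; excluded by Pre_

-- ===== PRECONDITION & SPEC =====
-- Pre_ excludes the inputs on which Python A raises (KeyError on a node with no graph entry,
-- IndexError on an entry with fewer than two children). It is slightly narrower than
-- necessary: when cur is neither already visited nor an input, it asks EVERY graph entry to be
-- well-formed (two children, each child an input or a key), not only the reachable ones.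
def Pre_recursive_get_binary_tree (cur : Int) (valid_graph : List (Int × List Int)) (visited : List Int) (valid_tree : List (Int × List Int)) : Prop :=
  cur ∈ visited ∨ cur < 20 ∨
    (((PySem.Dict.mk valid_graph).get? cur).isSome ∧
      ∀ p ∈ valid_graph, 2 ≤ p.2.length ∧
        ∀ c ∈ p.2.take 2, c < 20 ∨ ((PySem.Dict.mk valid_graph).get? c).isSome)
instance (cur : Int) (valid_graph : List (Int × List Int)) (visited : List Int) (valid_tree : List (Int × List Int)) : Decidable (Pre_recursive_get_binary_tree cur valid_graph visited valid_tree) := by unfold Pre_recursive_get_binary_tree; infer_instance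

def pvWitness_recursive_get_binary_tree : Int × (List (Int × List Int)) × List Int × (List (Int × List Int)) :=
  (22, [(22, [1, 21]), (21, [2, 3])], [], [])

def Spec_recursive_get_binary_tree (cur : Int) (valid_graph : List (Int × List Int)) (visited : List Int) (valid_tree : List (Int × List Int)) (out : Int) : Prop := out = recursive_get_binary_tree_alt cur valid_graph visited valid_tree
instance (cur : Int) (valid_graph : List (Int × List Int)) (visited : List Int) (valid_tree : List (Int × List Int)) (out : Int) : Decidable (Spec_recursive_get_binary_tree cur valid_graph visited valid_tree out) := by unfold Spec_recursive_get_binary_tree; infer_instance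

-- ===== CLAIM (what is proved, stated in full; the proofs are below) =====
def Claim_equal_recursive_get_binary_tree : Prop := ∀ (cur : Int) (valid_graph : List (Int × List Int)) (visited : List Int) (valid_tree : List (Int × List Int)), Dom_recursive_get_binary_tree cur valid_graph visited valid_tree → Pre_recursive_get_binary_tree cur valid_graph visited valid_tree → Spec_recursive_get_binary_tree cur valid_graph visited valid_tree (recursive_get_binary_tree cur valid_graph visited valid_tree)

-- ===== LEMMAS AND PROOFS =====

-- measure: number of graph keys not yet visited
def pvMu (g : List (Int × List Int)) (v : List Int) : Nat :=
  (g.map Prod.fst).countP (fun k => !(decide (k ∈ v)))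

theorem goA_visited_mono : ∀ (fuel : Nat) (g : List (Int × List Int)) (cur : Int) (v t : _) (r : Int) (v' t' : _),
    goA fuel g cur v t = some (r, v', t') → ∀ x ∈ v, x ∈ v' := by
  intro fuel
  induction fuel with
  | zero => intro g cur v t r v' t' h; simp [goA] at h
  | succ n ih =>
    intro g cur v t r v' t' h x hx
    rw [goA] at h
    split_ifs at h with h1 h2
    · simp only [Option.some.injEq, Prod.mk.injEq] at h
      exact h.2.1 ▸ hx
    · simp only [Option.some.injEq, Prod.mk.injEq] at h
      rw [← h.2.1]
      simp [PySem.Set.mem_add, hx]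
    · -- recursive case
      rcases hg : (PySem.Dict.mk g).get? cur with _ | children <;> rw [hg] at h <;> dsimp only at h
      · exact absurd h (by simp)
      rcases h0 : PySem.List.pyGet? children 0 with _ | lft
      · rw [h0] at h
        rcases h1' : PySem.List.pyGet? children 1 with _ | rgt <;> rw [h1'] at h <;> dsimp only at h <;>
          exact absurd h (by simp)
      rw [h0] at h
      rcases h1' : PySem.List.pyGet? children 1 with _ | rgt <;> rw [h1'] at h <;> dsimp only at h
      · exact absurd h (by simp)
      rcases hL : goA n g lft (PySem.Set.add v cur) t with _ | ⟨l, v2, t2⟩ <;> rw [hL] at h <;> dsimp only at h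
      · exact absurd h (by simp)
      rcases hR : goA n g rgt v2 t2 with _ | ⟨rr, v3, t3⟩ <;> rw [hR] at h <;> dsimp only at h
      · exact absurd h (by simp)
      have hx1 : x ∈ PySem.Set.add v cur := by simp [PySem.Set.mem_add, hx]
      have hx2 : x ∈ v2 := ih g lft (PySem.Set.add v cur) t l v2 t2 hL x hx1
      have hx3 : x ∈ v3 := ih g rgt v2 t2 rr v3 t3 hR x hx2
      split_ifs at h <;> simp only [Option.some.injEq, Prod.mk.injEq] at h <;>
        exact h.2.1 ▸ hx3

theorem pvMu_le_of_subset (g : List (Int × List Int)) (v v' : List Int)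
    (h : ∀ x ∈ v, x ∈ v') : pvMu g v' ≤ pvMu g v := by
  unfold pvMu
  refine List.countP_mono_left ?_
  intro a _ ha
  simp only [Bool.not_eq_eq_eq_not, Bool.not_true, decide_eq_false_iff_not] at ha ⊢
  exact fun hav => ha (h a hav)

theorem pvCountP_lt (v : List Int) (cur : Int) (hnv : cur ∉ v) :
    ∀ l : List Int, cur ∈ l →
      l.countP (fun k => !(decide (k ∈ v ++ [cur]))) < l.countP (fun k => !(decide (k ∈ v))) := by
  intro l hk
  induction l with
  | nil => simp at hk
  | cons x xs ih =>
    rw [List.countP_cons, List.countP_cons]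
    have hmono : xs.countP (fun k => !(decide (k ∈ v ++ [cur]))) ≤
        xs.countP (fun k => !(decide (k ∈ v))) := by
      refine List.countP_mono_left ?_
      intro a _ ha
      simp only [List.mem_append, List.mem_singleton,
        Bool.not_eq_eq_eq_not, Bool.not_true, decide_eq_false_iff_not, not_or] at ha ⊢
      exact ha.1
    by_cases hx : x = cur
    · subst hx
      have h1 : (!(decide (x ∈ v ++ [x]))) = false := by simp
      have h2 : (!(decide (x ∈ v))) = true := by simp [hnv]
      simp only [h1, h2]
      simp only [Bool.false_eq_true, if_false, if_true]
      omega
    · have hk' : cur ∈ xs := by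
        rcases List.mem_cons.mp hk with h | h
        · exact absurd h.symm hx
        · exact h
      have hlt := ih hk'
      have heads : (!(decide (x ∈ v ++ [cur]))) = (!(decide (x ∈ v))) := by
        simp [List.mem_append, hx]
      rw [heads]
      split <;> omega

theorem pvMu_lt (g : List (Int × List Int)) (v : List Int) (cur : Int)
    (hk : cur ∈ g.map Prod.fst) (hnv : cur ∉ v) :
    pvMu g (PySem.Set.add v cur) < pvMu g v := by
  unfold pvMu
  have hadd : PySem.Set.add v cur = v ++ [cur] := by
    simp [PySem.Set.add, PySem.Set.contains, hnv]
  rw [hadd]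
  exact pvCountP_lt v cur hnv _ hk

-- under Pre_'s graph condition, A returns with fuel pvMu+1
theorem goA_suff : ∀ (n : Nat) (g : List (Int × List Int)) (cur : Int) (v t : _),
    (∀ p ∈ g, 2 ≤ p.2.length ∧ ∀ c ∈ p.2.take 2, c < 20 ∨ ((PySem.Dict.mk g).get? c).isSome) →
    (cur ∈ v ∨ cur < 20 ∨ ((PySem.Dict.mk g).get? cur).isSome) →
    pvMu g v ≤ n →
    ∃ r v' t', goA (n + 1) g cur v t = some (r, v', t') := by
  intro n
  induction n with
  | zero =>
    intro g cur v t hG hok hmu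
    by_cases hv : cur ∈ v
    · exact ⟨-1, v, t, by simp [goA, hv]⟩
    by_cases hlt : cur < 20
    · exact ⟨cur, PySem.Set.add v cur, t, by simp [goA, hv, hlt]⟩
    rcases hok with h | h | h
    · exact absurd h hv
    · exact absurd h hlt
    · obtain ⟨children, hg⟩ := Option.isSome_iff_exists.mp h
      have hmem : (cur, children) ∈ g := PySem.Dict.mem_items_of_get?_eq_some _ hg
      have hkey : cur ∈ g.map Prod.fst := List.mem_map.mpr ⟨(cur, children), hmem, rfl⟩
      have : 0 < pvMu g v := List.countP_pos_iff.mpr ⟨cur, hkey, by simp [hv]⟩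
      omega
  | succ n ih =>
    intro g cur v t hG hok hmu
    by_cases hv : cur ∈ v
    · exact ⟨-1, v, t, by simp [goA, hv]⟩
    by_cases hlt : cur < 20
    · exact ⟨cur, PySem.Set.add v cur, t, by simp [goA, hv, hlt]⟩
    rcases hok with h | h | h
    · exact absurd h hv
    · exact absurd h hlt
    obtain ⟨children, hg⟩ := Option.isSome_iff_exists.mp h
    have hmem : (cur, children) ∈ g := PySem.Dict.mem_items_of_get?_eq_some _ hg
    have hkey : cur ∈ g.map Prod.fst := List.mem_map.mpr ⟨(cur, children), hmem, rfl⟩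
    have hlen : 2 ≤ children.length := (hG _ hmem).1
    have h0 : PySem.List.pyGet? children 0 = some (children[0]'(by omega)) := by
      simpa using PySem.List.pyGet?_ofNat children 0 (by omega)
    have h1 : PySem.List.pyGet? children 1 = some (children[1]'(by omega)) := by
      simpa using PySem.List.pyGet?_ofNat children 1 (by omega)
    have hm0 : children[0]'(by omega) ∈ children.take 2 := by
      have : (children.take 2)[0]'(by simp; omega) = children[0]'(by omega) :=
        List.getElem_take
      exact this ▸ List.getElem_mem _
    have hm1 : children[1]'(by omega) ∈ children.take 2 := by
      have : (children.take 2)[1]'(by simp; omega) = children[1]'(by omega) :=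
        List.getElem_take
      exact this ▸ List.getElem_mem _
    have hok0 := (hG _ hmem).2 _ hm0
    have hok1 := (hG _ hmem).2 _ hm1
    have hmu1 : pvMu g (PySem.Set.add v cur) ≤ n := by
      have := pvMu_lt g v cur hkey hv
      omega
    have hadd : PySem.Set.add v cur = v ++ [cur] := by
      simp [PySem.Set.add, PySem.Set.contains, hv]
    have hok0' : children[0]'(by omega) ∈ PySem.Set.add v cur ∨ children[0]'(by omega) < 20 ∨
        ((PySem.Dict.mk g).get? (children[0]'(by omega))).isSome := by tauto
    obtain ⟨l, v2, t2, hL⟩ := ih g _ (PySem.Set.add v cur) t hG hok0' hmu1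
    rw [hadd] at hL
    have hsub : ∀ x ∈ PySem.Set.add v cur, x ∈ v2 := hadd ▸ goA_visited_mono (n+1) g _ _ _ _ _ _ hL
    have hmu2 : pvMu g v2 ≤ n := le_trans (pvMu_le_of_subset g _ v2 hsub) hmu1
    have hok1' : children[1]'(by omega) ∈ v2 ∨ children[1]'(by omega) < 20 ∨
        ((PySem.Dict.mk g).get? (children[1]'(by omega))).isSome := by tauto
    obtain ⟨r2, v3, t3, hR⟩ := ih g _ v2 t2 hG hok1' hmu2
    by_cases hc : l ≥ 0 ∧ r2 ≥ 0
    · exact ⟨cur, v3, ((PySem.Dict.mk t3).insert cur [l, r2]).items,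
        by rw [goA]; simp [hv, hlt, hg, h0, h1, hL, hR, hc]⟩
    · exact ⟨if l ≥ 0 then l else r2, v3, t3,
        by rw [goA]; simp [hv, hlt, hg, h0, h1, hL, hR, hc]⟩

-- simulation: one completed recursive call = k deterministic machine steps
theorem goA_goB_sim : ∀ (fa : Nat) (g : List (Int × List Int)) (cur : Int) (v t : _) (r : Int) (v' t' : _),
    goA fa g cur v t = some (r, v', t') →
    ∃ k, k + 2 ≤ 2 ^ (fa + 1) ∧
      ∀ frames vals fb, goB (k + fb) g ((false, cur) :: frames) vals v t = goB fb g frames (r :: vals) v' t' := by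
  intro fa
  induction fa with
  | zero => intro g cur v t r v' t' h; simp [goA] at h
  | succ n ih =>
    intro g cur v t r v' t' h
    have hpow : 2 ^ (n + 1 + 1) = 2 ^ (n + 1) + 2 ^ (n + 1) := by ring
    have hpow4 : 4 ≤ 2 ^ (n + 1 + 1) := by
      have : 2 ^ 2 ≤ 2 ^ (n + 1 + 1) := Nat.pow_le_pow_right (by norm_num) (by omega)
      simpa using this
    rw [goA] at h
    split_ifs at h with hv hlt
    · simp only [Option.some.injEq, Prod.mk.injEq] at h
      obtain ⟨hr, hvv, htt⟩ := h
      subst hr hvv htt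
      refine ⟨1, by omega, ?_⟩
      intro frames vals fb
      rw [Nat.add_comm 1 fb]
      conv_lhs => rw [goB.eq_def]
      simp [hv]
    · simp only [Option.some.injEq, Prod.mk.injEq] at h
      obtain ⟨hr, hvv, htt⟩ := h
      subst hr hvv htt
      refine ⟨1, by omega, ?_⟩
      intro frames vals fb
      rw [Nat.add_comm 1 fb]
      conv_lhs => rw [goB.eq_def]
      simp [hv, hlt]
    · rcases hg : (PySem.Dict.mk g).get? cur with _ | children <;> rw [hg] at h <;> dsimp only at h
      · exact absurd h (by simp)
      rcases h0 : PySem.List.pyGet? children 0 with _ | lft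
      · rw [h0] at h
        rcases h1' : PySem.List.pyGet? children 1 with _ | rgt <;> rw [h1'] at h <;> dsimp only at h <;>
          exact absurd h (by simp)
      rw [h0] at h
      rcases h1' : PySem.List.pyGet? children 1 with _ | rgt <;> rw [h1'] at h <;> dsimp only at h
      · exact absurd h (by simp)
      rcases hL : goA n g lft (PySem.Set.add v cur) t with _ | ⟨l, v2, t2⟩ <;> rw [hL] at h <;> dsimp only at h
      · exact absurd h (by simp)
      rcases hR : goA n g rgt v2 t2 with _ | ⟨r2, v3, t3⟩ <;> rw [hR] at h <;> dsimp only at h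
      · exact absurd h (by simp)
      obtain ⟨k1, hk1, e1⟩ := ih g lft (PySem.Set.add v cur) t l v2 t2 hL
      obtain ⟨k2, hk2, e2⟩ := ih g rgt v2 t2 r2 v3 t3 hR
      refine ⟨k1 + k2 + 2, by omega, ?_⟩
      intro frames vals fb
      have e0 : k1 + k2 + 2 + fb = (k1 + (k2 + (1 + fb))) + 1 := by omega
      rw [e0]
      conv_lhs => rw [goB.eq_def]
      simp only [hv, if_false, hlt, hg, h0, h1', reduceIte]
      rw [e1 ((false, rgt) :: (true, cur) :: frames) vals (k2 + (1 + fb))]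
      rw [e2 ((true, cur) :: frames) (l :: vals) (1 + fb)]
      rw [Nat.add_comm 1 fb]
      conv_lhs => rw [goB.eq_def]
      simp only [Bool.true_eq_false, if_false]
      simp only [ge_iff_le] at h ⊢
      by_cases hc : 0 ≤ l ∧ 0 ≤ r2
      · rw [if_pos hc] at h
        simp only [Option.some.injEq, Prod.mk.injEq] at h
        obtain ⟨hr, hvv, htt⟩ := h
        subst hr hvv htt
        rw [if_pos hc]
      · rw [if_neg hc] at h
        simp only [Option.some.injEq, Prod.mk.injEq] at h
        obtain ⟨hr, hvv, htt⟩ := h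
        subst hvv htt
        rw [if_neg hc, ← hr]

-- ===== VERDICT (by name: the statement is the Claim_ definition above) =====
theorem recursive_get_binary_tree_spec : Claim_equal_recursive_get_binary_tree := by
  intro cur g v t _ hpre
  have hA : ∃ r v' t', goA (g.length + 1) g cur v t = some (r, v', t') := by
    rcases hpre with hv | hlt | ⟨hs, hG⟩
    · exact ⟨-1, v, t, by simp [goA, hv]⟩
    · by_cases hv : cur ∈ v
      · exact ⟨-1, v, t, by simp [goA, hv]⟩
      · exact ⟨cur, PySem.Set.add v cur, t, by simp [goA, hv, hlt]⟩
    · refine goA_suff g.length g cur v t hG (Or.inr (Or.inr hs)) ?_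
      calc pvMu g v ≤ (g.map Prod.fst).length := List.countP_le_length
        _ = g.length := List.length_map ..
  obtain ⟨r, v', t', hA⟩ := hA
  obtain ⟨k, hk, e⟩ := goA_goB_sim (g.length + 1) g cur v t r v' t' hA
  have hkle : k + 2 ≤ 2 ^ (g.length + 2) := hk
  have hF : k + (2 ^ (g.length + 2) - k) = 2 ^ (g.length + 2) := by omega
  have hB := e [] [] (2 ^ (g.length + 2) - k)
  rw [hF] at hB
  have hfb : 2 ^ (g.length + 2) - k = (2 ^ (g.length + 2) - k - 1) + 1 := by omega
  have hB2 : goB (2 ^ (g.length + 2) - k) g [] [r] v' t' = some (r, v', t') := by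
    rw [hfb]
    conv_lhs => rw [goB.eq_def]
  show _ = recursive_get_binary_tree_alt cur g v t
  unfold recursive_get_binary_tree recursive_get_binary_tree_alt
  rw [hA, hB, hB2]
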